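-- pv_equiv track=rewrite | github.com/maux96/DAA-Problema-3 | heuristica.py | first_min_intersection
-- ===== SOURCE A (Python) =====
-- MAX_VALUE = 1000000000000
--
-- def first_min_intersection(k,prop_list:list):
--     result = []
--     while len(prop_list) > 0 or len(result) >= k:
--         min = MAX_VALUE
--         best = None
--         delete = None
--
--         if len(prop_list) == 0 or len(result)>=k:
--             break
--
--         for prop in prop_list:
--             intersection = instersections_len(prop, prop_list)
--             if intersection[0] < min:
--                 best = prop
--                 min = intersection[0]
--                 delete = intersection[1]
--
--         result.append(best)
--         for p in delete:
--             prop_list.remove(p)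
--
--     if len(result) >= k:
--         return result
--     else:
--         return None
--
-- def instersections_len(prop, prop_list):
--     result = 0
--     intersections = [prop]
--     for p in prop_list:
--         if p != prop:
--             if len(p & prop) > 0:
--                 result +=1
--                 intersections.append(p)
--
--     return result, intersections
-- ===== SOURCE B (Python) =====
-- # B: build the conflict graph once via an element->set-indices inverted index
-- # (adjacency lists), then run the greedy selection with incrementally maintained
-- # degree counters -- no intersections are ever recomputed during the loop.
-- # Unlike A, B does not mutate prop_list; the equivalence proved is about the return value.
-- def first_min_intersection(k, prop_list):
--     n = len(prop_list)
--     canon = [frozenset(p) for p in prop_list]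
--     occ = {}
--     for i, p in enumerate(prop_list):
--         for e in p:
--             occ.setdefault(e, []).append(i)
--     adj = []
--     for i in range(n):
--         nb = set()
--         for e in prop_list[i]:
--             nb.update(occ[e])
--         adj.append({j for j in nb if canon[j] != canon[i]})
--     deg = [len(adj[i]) for i in range(n)]
--     alive = [True] * n
--     remaining = n
--     result = []
--     while remaining > 0 and len(result) < k:
--         best = None
--         for i in range(n):
--             if alive[i] and (best is None or deg[i] < deg[best]):
--                 best = i
--         result.append(prop_list[best])
--         victims = [best] + [j for j in adj[best] if alive[j]]
--         for v in victims:
--             alive[v] = False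
--             remaining -= 1
--             for w in adj[v]:
--                 deg[w] -= 1
--     return result if len(result) >= k else None
-- ===== Notes on version B (the rewrite author's own statement) =====
-- stated objective: faster
-- what changed: B replaces A's per-round rescans (recomputing every pairwise set intersection over the shrinking list, then deleting by value with list.remove) by building the conflict graph once via an element-to-set-indices inverted index into adjacency lists, and running the greedy loop on incrementally maintained degree counters and an alive bit-array, so no intersection is ever recomputed; B does not mutate prop_list (the equivalence proved is about the return value).
import Mathlib
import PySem

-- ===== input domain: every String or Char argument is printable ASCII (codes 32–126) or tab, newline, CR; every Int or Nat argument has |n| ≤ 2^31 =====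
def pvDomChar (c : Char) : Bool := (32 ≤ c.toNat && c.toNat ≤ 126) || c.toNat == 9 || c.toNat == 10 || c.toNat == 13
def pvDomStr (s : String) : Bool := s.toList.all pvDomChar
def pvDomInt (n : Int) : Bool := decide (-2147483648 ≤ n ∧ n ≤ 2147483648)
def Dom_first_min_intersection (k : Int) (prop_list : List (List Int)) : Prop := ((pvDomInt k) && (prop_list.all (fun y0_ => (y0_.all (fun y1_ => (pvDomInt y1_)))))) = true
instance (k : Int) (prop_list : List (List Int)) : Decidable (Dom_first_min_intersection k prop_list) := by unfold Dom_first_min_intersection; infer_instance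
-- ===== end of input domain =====

-- B builds the conflict graph once through an element→set-indices inverted index and runs the
-- greedy loop on incrementally maintained degree counters (A recomputes set intersections each
-- round); A mutates prop_list in place (B does not): the equivalence proved is about the return value.

-- ===== PORT A =====
-- The elements of prop_list are Python sets (the repo calls 'p & prop', 'p != prop'):
-- an inner List Int stands for the set of its elements (PySem.Set.ofList).

-- Python '==' on two sets, applied to the lists that represent them.
def pvSetEq (a b : List Int) : Bool :=
  PySem.Set.equal (PySem.Set.ofList a) (PySem.Set.ofList b)

-- Python 'len(a & b) > 0' on the sets represented by a and b.
def pvInterPos (a b : List Int) : Bool :=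
  decide (0 < (PySem.Set.inter (PySem.Set.ofList a) (PySem.Set.ofList b)).length)

-- Python list.remove(v) on a list of sets ('==' is set equality). Python raises ValueError
-- when no element matches; A only ever removes elements that are present, so the [] case is
-- unreachable in A's runs (hand port: PySem.List.remove? uses plain list equality, not set equality).
def pvRemoveSet : List (List Int) → List Int → List (List Int)
  | [], _ => []
  | x :: xs, v => if pvSetEq x v then xs else x :: pvRemoveSet xs v

def instersections_len (prop : List Int) (prop_list : List (List Int)) :
    Int × List (List Int) :=
  prop_list.foldl
    (fun st p =>
      if !pvSetEq p prop then               -- if p != prop: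
        if pvInterPos p prop then           --   if len(p & prop) > 0:
          (st.1 + 1, st.2 ++ [p])
        else st
      else st)
    (0, [prop])

-- A's while loop; fuel = len(prop_list)+1 only makes the recursion structural (each
-- iteration removes at least one element, so fuel is never exhausted).
def fmiLoop (k : Int) : Nat → List (List Int) → List (List Int) → List (List Int)
  | 0, _, result => result
  | fuel+1, plist, result =>
    if plist.length > 0 ∨ (result.length : Int) ≥ k then
      if plist.length = 0 ∨ (result.length : Int) ≥ k then result
      else
        let scan := plist.foldl
          (fun (st : Int × Option (List Int) × Option (List (List Int))) prop =>
            let it := instersections_len prop plist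
            if it.1 < st.1 then (it.1, some prop, some it.2) else st)
          (1000000000000, none, none)
        match scan.2.1, scan.2.2 with
        | some best, some delete =>
            fmiLoop k fuel (delete.foldl (fun acc p => pvRemoveSet acc p) plist)
              (result ++ [best])
        | _, _ => result   -- best is still None: Python would raise TypeError; outside Pre_
    else result

def first_min_intersection (k : Int) (prop_list : List (List Int)) :
    Option (List (List Int)) :=
  let result := fmiLoop k (prop_list.length + 1) prop_list []
  if (result.length : Int) ≥ k then some result else none

-- ===== PORT B =====
-- canon = [frozenset(p) for p in prop_list]
def bCanon (prop_list : List (List Int)) : List (PySem.Set Int) :=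
  prop_list.map (fun p => PySem.Set.ofList p)

-- occ: inverted index element → indices of the sets containing it
-- ('for i, p in enumerate(prop_list): for e in p: occ.setdefault(e, []).append(i)';
--  indices are the Nat positions of zipIdx, the values Python's nonnegative ints)
def bOcc (prop_list : List (List Int)) : PySem.Dict Int (List Nat) :=
  prop_list.zipIdx.foldl
    (fun d pi => pi.1.foldl (fun d e => d.modify e [] (fun b => b ++ [pi.2])) d)
    PySem.Dict.empty

-- adjacency lists: adj[i] = {j : set j shares an element with set i and differs from it}
def bAdj (prop_list : List (List Int)) : List (PySem.Set Nat) :=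
  (List.range prop_list.length).foldl
    (fun adj i =>
      adj ++ [((prop_list.getD i []).foldl
          (fun s e => PySem.Set.update s ((bOcc prop_list).getD e []))
          PySem.Set.empty).filter
        (fun j => !PySem.Set.equal ((bCanon prop_list).getD j PySem.Set.empty)
                                   ((bCanon prop_list).getD i PySem.Set.empty))])
    []

-- the greedy loop with incrementally maintained degrees; fuel = n+1 only makes the
-- recursion structural (remaining strictly decreases every round)
def bLoop (adj : List (PySem.Set Nat)) (orig : List (List Int)) (k : Int) :
    Nat → List Bool → List Int → Int → List (List Int) → List (List Int)
  | 0, _, _, _, result => result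
  | fuel+1, alive, deg, remaining, result =>
    if remaining > 0 ∧ (result.length : Int) < k then
      let best := (List.range orig.length).foldl
        (fun (b : Option Nat) i =>
          if alive.getD i false then
            match b with
            | none => some i
            | some m => if deg.getD i 0 < deg.getD m 0 then some i else b
          else b) none
      match best with
      | some b =>
        let victims := b :: (adj.getD b PySem.Set.empty).filter (fun j => alive.getD j false)
        let st := victims.foldl
          (fun (s : List Bool × List Int × Int) v =>
            (s.1.set v false,
             (adj.getD v PySem.Set.empty).foldl
               (fun dg w => dg.set w (dg.getD w 0 - 1)) s.2.1,
             s.2.2 - 1))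
          (alive, deg, remaining)
        bLoop adj orig k fuel st.1 st.2.1 st.2.2 (result ++ [orig.getD b []])
      | none => result   -- unreachable: remaining > 0 means some index is alive
    else result

def first_min_intersection_alt (k : Int) (prop_list : List (List Int)) :
    Option (List (List Int)) :=
  let n := prop_list.length
  let adj := bAdj prop_list
  let deg := (List.range n).map (fun i => ((adj.getD i PySem.Set.empty).length : Int))
  let result := bLoop adj prop_list k (n + 1) (List.replicate n true) deg (n : Int) []
  if (result.length : Int) ≥ k then some result else none

-- ===== PRECONDITION & SPEC =====
-- Pre_ excludes inputs with more than MAX_VALUE = 10^12 sets: there A's sentinel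
-- 'min = MAX_VALUE' can be undercut by no candidate, best stays None and A raises
-- TypeError ('for p in None'); no physically realisable input reaches this bound.
def Pre_first_min_intersection (k : Int) (prop_list : List (List Int)) : Prop :=
  prop_list.length ≤ 1000000000000

instance (k : Int) (prop_list : List (List Int)) :
    Decidable (Pre_first_min_intersection k prop_list) := by
  unfold Pre_first_min_intersection; infer_instance

def pvWitness_first_min_intersection : Int × List (List Int) := (2, [[1], [2], [2, 3]])

def Spec_first_min_intersection (k : Int) (prop_list : List (List Int)) (out : Option (List (List Int))) : Prop := out = first_min_intersection_alt k prop_list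
instance (k : Int) (prop_list : List (List Int)) (out : Option (List (List Int))) : Decidable (Spec_first_min_intersection k prop_list out) := by unfold Spec_first_min_intersection; infer_instance

-- ===== CLAIM (what is proved, stated in full; the proofs are below) =====
def Claim_equal_first_min_intersection : Prop := ∀ (k : Int) (prop_list : List (List Int)), Dom_first_min_intersection k prop_list → Pre_first_min_intersection k prop_list → Spec_first_min_intersection k prop_list (first_min_intersection k prop_list)

-- ===== LEMMAS AND PROOFS =====

-- proof-side abbreviations: the value at an index and the conflict predicate on values
def pvV (l : List (List Int)) (i : Nat) : List Int := l.getD i []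
def pvCb (p q : List Int) : Bool := !pvSetEq p q && pvInterPos p q

-- the common reference loop both ports are reduced to: greedy over the list of live
-- indices (increasing), keyed by the number of live conflictors
def specLoop (l : List (List Int)) (k : Int) :
    Nat → List Nat → List (List Int) → List (List Int)
  | 0, _, result => result
  | fuel+1, alive, result =>
    if alive ≠ [] ∧ (result.length : Int) < k then
      match PySem.List.min? alive
          (fun i => ((alive.countP (fun j => pvCb (pvV l i) (pvV l j)) : Nat) : Int)) with
      | some best =>
          specLoop l k fuel
            (alive.filter (fun j => j ≠ best && !pvCb (pvV l best) (pvV l j)))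
            (result ++ [pvV l best])
      | none => result
    else result

lemma pvSetEq_iff (a b : List Int) : pvSetEq a b = true ↔ ∀ x : Int, x ∈ a ↔ x ∈ b := by
  simp only [pvSetEq, PySem.Set.equal, PySem.Set.issubset, PySem.Set.contains,
    Bool.and_eq_true, List.all_eq_true]
  constructor
  · rintro ⟨h1, h2⟩ x
    constructor
    · intro hx
      have := h1 x (by simpa [PySem.Set.mem_ofList] using hx)
      simpa [List.contains_eq_mem, PySem.Set.mem_ofList] using this
    · intro hx
      have := h2 x (by simpa [PySem.Set.mem_ofList] using hx)
      simpa [List.contains_eq_mem, PySem.Set.mem_ofList] using this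
  · intro h
    constructor
    · intro x hx
      simp only [List.contains_eq_mem, decide_eq_true_eq, PySem.Set.mem_ofList]
      exact (h x).1 (by simpa [PySem.Set.mem_ofList] using hx)
    · intro x hx
      simp only [List.contains_eq_mem, decide_eq_true_eq, PySem.Set.mem_ofList]
      exact (h x).2 (by simpa [PySem.Set.mem_ofList] using hx)

lemma pvInterPos_iff (a b : List Int) : pvInterPos a b = true ↔ ∃ x : Int, x ∈ a ∧ x ∈ b := by
  simp [pvInterPos, PySem.Set.inter, List.length_pos_iff, List.filter_eq_nil_iff,
    PySem.Set.contains, List.contains_eq_mem, PySem.Set.mem_ofList]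

lemma pvSetEq_refl (a : List Int) : pvSetEq a a = true := (pvSetEq_iff a a).2 (by simp)

lemma pvCb_self (a : List Int) : pvCb a a = false := by simp [pvCb, pvSetEq_refl]

lemma pvSetEq_symm (a b : List Int) : pvSetEq a b = pvSetEq b a := by
  rw [Bool.eq_iff_iff, pvSetEq_iff, pvSetEq_iff]
  exact ⟨fun h x => (h x).symm, fun h x => (h x).symm⟩

lemma pvCb_symm (a b : List Int) : pvCb a b = pvCb b a := by
  have h2 : pvInterPos a b = pvInterPos b a := by
    rw [Bool.eq_iff_iff, pvInterPos_iff, pvInterPos_iff]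
    exact ⟨fun ⟨x, h⟩ => ⟨x, h.2, h.1⟩, fun ⟨x, h⟩ => ⟨x, h.2, h.1⟩⟩
  simp [pvCb, pvSetEq_symm a b, h2]

lemma pvCb_congr_left {a b : List Int} (h : pvSetEq a b = true) (c : List Int) :
    pvCb a c = pvCb b c := by
  have hm := (pvSetEq_iff a b).1 h
  have h1 : pvSetEq a c = pvSetEq b c := by
    rw [Bool.eq_iff_iff, pvSetEq_iff, pvSetEq_iff]
    exact ⟨fun hx x => (hm x).symm.trans (hx x), fun hx x => (hm x).trans (hx x)⟩
  have h2 : pvInterPos a c = pvInterPos b c := by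
    rw [Bool.eq_iff_iff, pvInterPos_iff, pvInterPos_iff]
    exact ⟨fun ⟨x, hx⟩ => ⟨x, (hm x).1 hx.1, hx.2⟩, fun ⟨x, hx⟩ => ⟨x, (hm x).2 hx.1, hx.2⟩⟩
  simp [pvCb, h1, h2]

lemma il_gen (prop : List Int) :
    ∀ (m : List (List Int)) (c : Int) (acc : List (List Int)),
      m.foldl
        (fun st p =>
          if !pvSetEq p prop then
            if pvInterPos p prop then (st.1 + 1, st.2 ++ [p]) else st
          else st) (c, acc)
      = (c + ((m.countP (fun p => pvCb p prop) : Nat) : Int),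
         acc ++ m.filter (fun p => pvCb p prop)) := by
  intro m
  induction m with
  | nil => intro c acc; simp
  | cons x t ih =>
    intro c acc
    rw [List.foldl_cons]
    by_cases h1 : pvSetEq x prop
    · have hstep : (if (!pvSetEq x prop) = true then
          if pvInterPos x prop = true then ((c : Int) + 1, acc ++ [x]) else (c, acc)
          else (c, acc)) = (c, acc) := by simp [h1]
      rw [hstep, ih]
      have hcb : pvCb x prop = false := by simp [pvCb, h1]
      simp [hcb]
    · by_cases h2 : pvInterPos x prop
      · have hstep : (if (!pvSetEq x prop) = true then
            if pvInterPos x prop = true then ((c : Int) + 1, acc ++ [x]) else (c, acc)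
            else (c, acc)) = (c + 1, acc ++ [x]) := by simp [h1, h2]
        rw [hstep, ih]
        have hcb : pvCb x prop = true := by simp [pvCb, h1, h2]
        refine Prod.ext ?_ ?_
        · simp [hcb]; ring
        · simp [hcb]
      · have hstep : (if (!pvSetEq x prop) = true then
            if pvInterPos x prop = true then ((c : Int) + 1, acc ++ [x]) else (c, acc)
            else (c, acc)) = (c, acc) := by simp [h1, h2]
        rw [hstep, ih]
        have hcb : pvCb x prop = false := by simp [pvCb, h1, h2]
        simp [hcb]

lemma il_spec (prop : List Int) (m : List (List Int)) :
    instersections_len prop m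
      = (((m.countP (fun p => pvCb p prop) : Nat) : Int),
         prop :: m.filter (fun p => pvCb p prop)) := by
  have h := il_gen prop m 0 [prop]
  unfold instersections_len
  simpa using h

lemma remove_skip {P : List Int → Bool}
    (hP : ∀ a b, pvSetEq a b = true → P a = P b) {x : List Int} (hx : P x = false) :
    ∀ (ds : List (List Int)) (xs : List (List Int)), (∀ d ∈ ds, P d = true) →
      ds.foldl (fun acc p => pvRemoveSet acc p) (x :: xs)
        = x :: ds.foldl (fun acc p => pvRemoveSet acc p) xs := by
  intro ds
  induction ds with
  | nil => intro xs _; simp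
  | cons d t ih =>
    intro xs hd
    have hxd : pvSetEq x d = false := by
      by_contra hc
      have : pvSetEq x d = true := by revert hc; cases pvSetEq x d <;> simp
      rw [hP x d this, hd d (by simp)] at hx; exact absurd hx (by simp)
    simp only [List.foldl_cons, pvRemoveSet, hxd]
    exact ih (pvRemoveSet xs d) (fun e he => hd e (by simp [he]))

lemma remove_fold_filter (P : List Int → Bool)
    (hP : ∀ a b, pvSetEq a b = true → P a = P b) :
    ∀ xs : List (List Int),
      (xs.filter P).foldl (fun acc p => pvRemoveSet acc p) xs
        = xs.filter (fun p => !P p) := by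
  intro xs
  induction xs with
  | nil => simp
  | cons x t ih =>
    by_cases h : P x
    · simp only [List.filter_cons, h, if_pos trivial]
      simp only [List.foldl_cons, pvRemoveSet, pvSetEq_refl]
      simpa [h] using ih
    · have hx : P x = false := by revert h; cases P x <;> simp
      have h1 : (x :: t).filter P = t.filter P := by simp [hx]
      have h2 : (x :: t).filter (fun p => !P p) = x :: t.filter (fun p => !P p) := by
        simp [hx]
      rw [h1, remove_skip hP hx (t.filter P) t (fun d hd => (List.mem_filter.1 hd).2), ih, h2]

def pvMinStep (key : Nat → Int) (acc : Option Nat) (x : Nat) : Option Nat :=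
  match acc with
  | none => some x
  | some m => if key x < key m then some x else some m

lemma min?_eq_fold (al : List Nat) (key : Nat → Int) :
    PySem.List.min? al key = al.foldl (pvMinStep key) none := by
  unfold PySem.List.min?
  apply List.foldl_ext
  intro b a _
  cases b <;> rfl

-- foldl characterisation of min?'s running state
lemma min_fold_split (key : Nat → Int) :
    ∀ (t : List Nat) (m : Nat), ∃ r ua wa,
      t.foldl (pvMinStep key) (some m) = some r
      ∧ m :: t = ua ++ r :: wa ∧ (∀ j ∈ ua, key r < key j) ∧ key r ≤ key m := by
  intro t
  induction t with
  | nil => intro m; exact ⟨m, [], [], by simp⟩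
  | cons a t' ih =>
    intro m
    by_cases h : key a < key m
    · obtain ⟨r, ua, wa, hf, hsplit, hua, hle⟩ := ih a
      refine ⟨r, m :: ua, wa, ?_, by simp [hsplit], ?_, by omega⟩
      · simpa [pvMinStep, h] using hf
      · intro j hj
        rcases List.mem_cons.1 hj with rfl | hj
        · omega
        · exact hua j hj
    · obtain ⟨r, ua, wa, hf, hsplit, hua, hle⟩ := ih m
      cases ua with
      | nil =>
        have h1 : m = r := by simpa using congrArg (fun l => l.headD 0) hsplit
        have h2 : t' = wa := by simpa using congrArg List.tail hsplit
        refine ⟨r, [], a :: wa, by simpa [pvMinStep, h] using hf, by simp [h1, h2], by simp, hle⟩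
      | cons u0 ua'' =>
        have hm : m = u0 := by simpa using congrArg (fun l => l.headD 0) hsplit
        have ht' : t' = ua'' ++ r :: wa := by simpa using congrArg List.tail hsplit
        refine ⟨r, m :: a :: ua'', wa, by simpa [pvMinStep, h] using hf, by simp [ht'], ?_, hle⟩
        intro j hj
        have hrm : key r < key m := hm ▸ hua u0 (by simp)
        rcases List.mem_cons.1 hj with rfl | hj
        · exact hrm
        · rcases List.mem_cons.1 hj with rfl | hj
          · omega
          · exact hua j (by simp [hj])

lemma min?_first_split (al : List Nat) (key : Nat → Int) (bi : Nat)
    (h : PySem.List.min? al key = some bi) :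
    bi ∈ al ∧ ∃ ua wa, al = ua ++ bi :: wa ∧ ∀ j ∈ ua, key bi < key j := by
  cases al with
  | nil => simp [PySem.List.min?] at h
  | cons a t =>
    obtain ⟨r, ua, wa, hf, hsplit, hua, _⟩ := min_fold_split key t a
    have hh : PySem.List.min? (a :: t) key = some r := by
      rw [min?_eq_fold, List.foldl_cons]
      exact hf
    have hr : r = bi := by rw [hh] at h; exact Option.some.inj h
    subst hr
    exact ⟨by rw [hsplit]; simp, ua, wa, hsplit, hua⟩

-- A's argmin fold runs in lockstep with min?'s fold once both carry a current best
lemma par_fold (l : List (List Int)) (m0 : List (List Int)) (key : Nat → Int) :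
    ∀ (al : List Nat) (mj : Nat),
      (∀ j ∈ al, (instersections_len (pvV l j) m0).1 = key j) →
      (instersections_len (pvV l mj) m0).1 = key mj →
      ∃ r, al.foldl (pvMinStep key) (some mj) = some r
        ∧ (al.map (pvV l)).foldl
            (fun (st : Int × Option (List Int) × Option (List (List Int))) prop =>
              let it := instersections_len prop m0
              if it.1 < st.1 then (it.1, some prop, some it.2) else st)
            (key mj, some (pvV l mj), some (instersections_len (pvV l mj) m0).2)
          = (key r, some (pvV l r), some (instersections_len (pvV l r) m0).2)
        ∧ (instersections_len (pvV l r) m0).1 = key r := by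
  intro al
  induction al with
  | nil => intro mj _ hmj; exact ⟨mj, by simp, by simp, hmj⟩
  | cons a t ih =>
    intro mj hal hmj
    have ha : (instersections_len (pvV l a) m0).1 = key a := hal a (by simp)
    by_cases h : key a < key mj
    · obtain ⟨r, hf, hA, hr⟩ := ih a (fun j hj => hal j (by simp [hj])) ha
      exact ⟨r, by simpa [pvMinStep, h] using hf, by simpa [ha, h, hmj] using hA, hr⟩
    · obtain ⟨r, hf, hA, hr⟩ := ih mj (fun j hj => hal j (by simp [hj])) hmj
      exact ⟨r, by simpa [pvMinStep, h] using hf, by simpa [ha, h, hmj] using hA, hr⟩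

lemma scan_eq_min? (l : List (List Int)) (m0 : List (List Int)) (al : List Nat)
    (key : Nat → Int)
    (hkey : ∀ j ∈ al, (instersections_len (pvV l j) m0).1 = key j)
    (hlt : ∀ j ∈ al, key j < 1000000000000)
    (hm : m0 = al.map (pvV l)) (hne : al ≠ []) :
    ∃ bi, PySem.List.min? al key = some bi ∧
      m0.foldl
        (fun (st : Int × Option (List Int) × Option (List (List Int))) prop =>
          let it := instersections_len prop m0
          if it.1 < st.1 then (it.1, some prop, some it.2) else st)
        (1000000000000, none, none)
      = (key bi, some (pvV l bi), some (instersections_len (pvV l bi) m0).2) := by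
  cases hal : al with
  | nil => exact absurd hal hne
  | cons a t =>
    subst hal
    rw [List.map_cons] at hm
    subst hm
    have ha : (instersections_len (pvV l a) (pvV l a :: List.map (pvV l) t)).1 = key a :=
      hkey a (by simp)
    have halt : key a < 1000000000000 := hlt a (by simp)
    obtain ⟨r, hf, hA, _⟩ :=
      par_fold l (pvV l a :: List.map (pvV l) t) key t a (fun j hj => hkey j (by simp [hj])) ha
    refine ⟨r, by rw [min?_eq_fold, List.foldl_cons]; exact hf, ?_⟩
    rw [List.foldl_cons]
    simpa [ha, halt] using hA

-- removing the first occurrence of b from u ++ b :: w, when nothing in u matches b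
lemma removeFirst_prefix (b : List Int) :
    ∀ (u w : List (List Int)), (∀ p ∈ u, pvSetEq p b = false) →
      pvRemoveSet (u ++ b :: w) b = u ++ w := by
  intro u
  induction u with
  | nil => intro w _; simp [pvRemoveSet, pvSetEq_refl]
  | cons x u' ih =>
    intro w hu
    have hx : pvSetEq x b = false := hu x (by simp)
    simp only [List.cons_append, pvRemoveSet, hx]
    rw [ih w (fun p hp => hu p (by simp [hp]))]
    simp

-- filter commutes with mapping indices to values
lemma map_filter_comm (l : List (List Int)) (p : List Int → Bool) (g : Nat → Bool) :
    ∀ al : List Nat, (∀ j ∈ al, p (pvV l j) = g j) →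
      (al.filter g).map (pvV l) = (al.map (pvV l)).filter p := by
  intro al
  induction al with
  | nil => intro _; simp
  | cons j t ih =>
    intro h
    have hj : p (pvV l j) = g j := h j (by simp)
    by_cases hg : g j
    · simp only [List.filter_cons, List.map_cons, hg, hj, if_pos trivial]
      rw [ih (fun x hx => h x (by simp [hx]))]
    · have hg' : g j = false := by revert hg; cases g j <;> simp
      rw [hg'] at hj
      have e1 : (j :: t).filter g = t.filter g := by simp [hg']
      have e2 : ((pvV l j) :: t.map (pvV l)).filter p = (t.map (pvV l)).filter p := by
        simp [hj]
      rw [e1, List.map_cons, e2]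
      exact ih (fun x hx => h x (by simp [hx]))

lemma countP_congr_mem {α : Type} (l : List α) (p q : α → Bool)
    (h : ∀ x ∈ l, p x = q x) : l.countP p = l.countP q := by
  induction l with
  | nil => rfl
  | cons a t ih => simp [List.countP_cons, h a (by simp), ih (fun x hx => h x (by simp [hx]))]

lemma countP_lt_of_mem_false {α : Type} (l : List α) (p : α → Bool) (x : α)
    (hx : x ∈ l) (hpx : p x = false) : l.countP p < l.length := by
  refine lt_of_le_of_ne l.countP_le_length (fun hc => ?_)
  have := List.countP_eq_length.1 hc x hx
  rw [hpx] at this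
  exact absurd this (by simp)

-- ===== A's loop equals the reference loop =====
lemma loop_eq (l : List (List Int)) (k : Int) (hN : l.length ≤ 1000000000000) :
    ∀ (fuel : Nat) (al : List Nat) (r : List (List Int)),
      al.Pairwise (· < ·) → al.length ≤ l.length → al.length < fuel →
      fmiLoop k fuel (al.map (pvV l)) r = specLoop l k fuel al r := by
  intro fuel
  induction fuel with
  | zero => intro al r _ _ hfuel; omega
  | succ f ih =>
    intro al r hpair hlen hfuel
    by_cases hk : (r.length : Int) ≥ k
    · rw [fmiLoop, specLoop]
      simp [hk]
    · by_cases hal : al = []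
      · subst hal
        rw [fmiLoop, specLoop]
        simp [hk]
      · set key : Nat → Int :=
          fun i => ((al.countP (fun j => pvCb (pvV l i) (pvV l j)) : Nat) : Int) with hkeydef
        have hkey : ∀ j ∈ al, (instersections_len (pvV l j) (al.map (pvV l))).1 = key j := by
          intro j hj
          rw [il_spec]
          have h1 : (al.map (pvV l)).countP (fun p => pvCb p (pvV l j))
              = al.countP (fun j' => pvCb (pvV l j) (pvV l j')) := by
            rw [List.countP_map]
            exact countP_congr_mem al _ _ (fun j' _ => by
              show pvCb (pvV l j') (pvV l j) = _
              rw [pvCb_symm])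
          rw [hkeydef]
          dsimp only
          exact_mod_cast congrArg (fun n : Nat => (n : Int)) h1
        have hlt : ∀ j ∈ al, key j < 1000000000000 := by
          intro j hj
          have h2 : al.countP (fun j' => pvCb (pvV l j) (pvV l j')) < al.length :=
            countP_lt_of_mem_false _ _ j hj (pvCb_self _)
          rw [hkeydef]
          dsimp only
          have : al.length ≤ 1000000000000 := le_trans hlen hN
          exact_mod_cast lt_of_lt_of_le h2 (by exact_mod_cast this)
        obtain ⟨bi, hmin, hscan⟩ := scan_eq_min? l (al.map (pvV l)) al key hkey hlt rfl hal
        obtain ⟨hbi_mem, ua, wa, hsplit, hua⟩ := min?_first_split al key bi hmin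
        set m := al.map (pvV l) with hmdef
        set P : List Int → Bool := fun p => pvCb p (pvV l bi) with hPdef
        have hPinv : ∀ a b, pvSetEq a b = true → P a = P b :=
          fun a b hab => pvCb_congr_left hab (pvV l bi)
        have hmsplit : m = ua.map (pvV l) ++ pvV l bi :: wa.map (pvV l) := by
          rw [hmdef, hsplit]; simp
        have hpre : ∀ p ∈ ua.map (pvV l), pvSetEq p (pvV l bi) = false := by
          intro p hp
          obtain ⟨j, hj, rfl⟩ := List.mem_map.1 hp
          by_contra hc
          have hE : pvSetEq (pvV l j) (pvV l bi) = true := by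
            revert hc; cases pvSetEq (pvV l j) (pvV l bi) <;> simp
          have hkj : key j = key bi := by
            rw [hkeydef]
            dsimp only
            have : al.countP (fun j' => pvCb (pvV l j) (pvV l j'))
                = al.countP (fun j' => pvCb (pvV l bi) (pvV l j')) :=
              countP_congr_mem al _ _ (fun j' _ => pvCb_congr_left hE (pvV l j'))
            exact_mod_cast congrArg (fun n : Nat => (n : Int)) this
          have := hua j hj
          omega
        have hremove : pvRemoveSet m (pvV l bi) = ua.map (pvV l) ++ wa.map (pvV l) := by
          rw [hmsplit]; exact removeFirst_prefix (pvV l bi) (ua.map (pvV l)) (wa.map (pvV l)) hpre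
        have hfilter_m : m.filter P = (ua.map (pvV l) ++ wa.map (pvV l)).filter P := by
          rw [hmsplit, List.filter_append, List.filter_append, List.filter_cons]
          have : P (pvV l bi) = false := pvCb_self _
          simp [this]
        have hplist' :
            ((instersections_len (pvV l bi) m).2).foldl (fun acc p => pvRemoveSet acc p) m
              = (ua.map (pvV l) ++ wa.map (pvV l)).filter (fun p => !P p) := by
          rw [il_spec]
          simp only [List.foldl_cons]
          rw [hremove, hfilter_m]
          exact remove_fold_filter P hPinv (ua.map (pvV l) ++ wa.map (pvV l))
        have hq : ∀ j ∈ ua ++ wa,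
            (decide (j ≠ bi) && !pvCb (pvV l bi) (pvV l j)) = !P (pvV l j) := by
          intro j hj
          have hjne : j ≠ bi := by
            rw [hsplit] at hpair
            rcases List.mem_append.1 hj with h | h
            · have := (List.pairwise_append.1 hpair).2.2 j h bi (by simp)
              omega
            · have := (List.pairwise_cons.1 (List.pairwise_append.1 hpair).2.1).1 j h
              omega
          simp [hjne, hPdef, pvCb_symm (pvV l bi) (pvV l j)]
        have halive' :
            al.filter (fun j => decide (j ≠ bi) && !pvCb (pvV l bi) (pvV l j))
              = (ua ++ wa).filter (fun j => decide (j ≠ bi) && !pvCb (pvV l bi) (pvV l j)) := by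
          rw [hsplit, List.filter_append, List.filter_append, List.filter_cons]
          simp
        have hmapalive :
            ((ua ++ wa).filter (fun j => decide (j ≠ bi) && !pvCb (pvV l bi) (pvV l j))).map (pvV l)
              = (ua.map (pvV l) ++ wa.map (pvV l)).filter (fun p => !P p) := by
          rw [map_filter_comm l (fun p => !P p) _ (ua ++ wa) (fun j hj => (hq j hj).symm),
            List.map_append]
        have hsub : (ua ++ wa).Sublist al := by
          rw [hsplit]
          exact List.Sublist.append (List.Sublist.refl ua) (List.sublist_cons_self bi wa)
        rw [fmiLoop, specLoop]
        have hc1 : (al.map (pvV l)).length > 0 ∨ (r.length : Int) ≥ k :=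
          Or.inl (by simp [List.length_pos_iff, hal])
        have hc2 : ¬((al.map (pvV l)).length = 0 ∨ (r.length : Int) ≥ k) := by
          push Not
          exact ⟨by simp [hal], by omega⟩
        have hcB : al ≠ [] ∧ (r.length : Int) < k := ⟨hal, by omega⟩
        rw [if_pos hc1, if_neg hc2, if_pos hcB, hmin]
        simp only [hscan]
        rw [hplist', halive', ← hmapalive]
        exact ih ((ua ++ wa).filter (fun j => decide (j ≠ bi) && !pvCb (pvV l bi) (pvV l j)))
          (r ++ [pvV l bi])
          (List.Pairwise.sublist (List.filter_sublist.trans hsub) hpair)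
          (by
            have := List.length_filter_le
              (fun j => decide (j ≠ bi) && !pvCb (pvV l bi) (pvV l j)) (ua ++ wa)
            have h2 := List.length_append (as := ua) (bs := wa)
            have h3 : al.length = ua.length + (wa.length + 1) := by rw [hsplit]; simp
            omega)
          (by
            have := List.length_filter_le
              (fun j => decide (j ≠ bi) && !pvCb (pvV l bi) (pvV l j)) (ua ++ wa)
            have h2 := List.length_append (as := ua) (bs := wa)
            have h3 : al.length = ua.length + (wa.length + 1) := by rw [hsplit]; simp
            omega)

lemma map_range_self (l : List (List Int)) :
    (List.range l.length).map (pvV l) = l := by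
  unfold pvV
  apply List.ext_getElem (by simp)
  intro i h1 h2
  simp [List.getElem?_eq_getElem h2]

-- ===== B-side lemmas =====

-- membership in a bucket of the inverted index
lemma bOcc_mem (l : List (List Int)) (e : Int) (j : Nat) :
    j ∈ (bOcc l).getD e [] ↔ j < l.length ∧ e ∈ pvV l j := by
  unfold bOcc
  have h2 : l.zipIdx.foldl
      (fun d pi => pi.1.foldl (fun d e => d.modify e [] (fun b => b ++ [pi.2])) d)
      PySem.Dict.empty
      = (l.zipIdx.flatMap (fun pi => pi.1.map (fun e => (e, pi.2)))).foldl
          (fun d p => d.modify p.1 [] (fun b => b ++ [p.2])) PySem.Dict.empty := by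
    rw [List.foldl_flatMap]
    apply List.foldl_ext
    intro d pi _
    rw [List.foldl_map]
  rw [h2, PySem.Dict.getD_foldl_modify_append]
  simp only [PySem.Dict.getD_empty, List.nil_append, List.mem_map, List.mem_filter,
    List.mem_flatMap]
  constructor
  · rintro ⟨pr, ⟨⟨pi, hpi, hpr⟩, heq⟩, rfl⟩
    obtain ⟨e', he', hpr'⟩ := hpr
    subst hpr'
    obtain ⟨p1, p2⟩ := pi
    have hsome : l[p2]? = some p1 := List.mk_mem_zipIdx_iff_getElem?.1 hpi
    have hlt : p2 < l.length := (List.getElem?_eq_some_iff.1 hsome).1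
    refine ⟨hlt, ?_⟩
    have he : e' = e := by simpa using heq
    subst he
    unfold pvV
    rw [List.getD_eq_getElem?_getD, hsome]
    exact he'
  · rintro ⟨hj, he⟩
    have hget : l[j]? = some (l.getD j []) := by
      rw [List.getD_eq_getElem?_getD, List.getElem?_eq_getElem hj]
      simp
    refine ⟨(e, j), ⟨⟨(l.getD j [], j), ?_, ?_⟩, by simp⟩, rfl⟩
    · exact List.mk_mem_zipIdx_iff_getElem?.2 hget
    · exact ⟨e, he, rfl⟩

-- membership in the running neighbour set of B's adjacency construction
lemma nb_mem (occ : PySem.Dict Int (List Nat)) (j : Nat) :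
    ∀ (es : List Int) (s : PySem.Set Nat),
      j ∈ es.foldl (fun s e => PySem.Set.update s (occ.getD e [])) s
        ↔ j ∈ s ∨ ∃ e ∈ es, j ∈ occ.getD e [] := by
  intro es
  induction es with
  | nil => intro s; simp
  | cons e t ih =>
    intro s
    rw [List.foldl_cons, ih]
    constructor
    · rintro (h | ⟨e', he', hj⟩)
      · rcases (PySem.Set.mem_update s (occ.getD e []) j).1 h with h' | h'
        · exact Or.inl h'
        · exact Or.inr ⟨e, by simp, h'⟩
      · exact Or.inr ⟨e', by simp [he'], hj⟩
    · rintro (h | ⟨e', he', hj⟩)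
      · exact Or.inl ((PySem.Set.mem_update _ _ _).2 (Or.inl h))
      · rcases List.mem_cons.1 he' with rfl | he'
        · exact Or.inl ((PySem.Set.mem_update _ _ _).2 (Or.inr hj))
        · exact Or.inr ⟨e', he', hj⟩

lemma nb_nodup (occ : PySem.Dict Int (List Nat)) :
    ∀ (es : List Int) (s : PySem.Set Nat), s.Nodup →
      (es.foldl (fun s e => PySem.Set.update s (occ.getD e [])) s).Nodup := by
  intro es
  induction es with
  | nil => intro s hs; exact hs
  | cons e t ih =>
    intro s hs
    rw [List.foldl_cons]
    exact ih _ (PySem.Set.nodup_update _ _ hs)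

lemma bAdj_eq_map (l : List (List Int)) :
    bAdj l = (List.range l.length).map (fun i =>
      ((l.getD i []).foldl
          (fun s e => PySem.Set.update s ((bOcc l).getD e []))
          PySem.Set.empty).filter
        (fun j => !PySem.Set.equal ((bCanon l).getD j PySem.Set.empty)
                                   ((bCanon l).getD i PySem.Set.empty))) := by
  unfold bAdj
  rw [PySem.List.foldl_append_singleton_eq_map]
  simp

lemma bCanon_getD (l : List (List Int)) (j : Nat) (hj : j < l.length) :
    (bCanon l).getD j PySem.Set.empty = PySem.Set.ofList (pvV l j) := by
  unfold bCanon pvV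
  rw [List.getD_eq_getElem?_getD, List.getElem?_map, List.getElem?_eq_getElem hj,
    List.getD_eq_getElem?_getD, List.getElem?_eq_getElem hj]
  simp

-- membership in an adjacency list
lemma bAdj_mem (l : List (List Int)) (i : Nat) (hi : i < l.length) (j : Nat) :
    j ∈ (bAdj l).getD i PySem.Set.empty ↔ j < l.length ∧ pvCb (pvV l i) (pvV l j) := by
  rw [bAdj_eq_map, PySem.List.getD_map_range _ _ _ _ hi, List.mem_filter, nb_mem]
  constructor
  · rintro ⟨h | ⟨e, he, hj⟩, hpred⟩
    · exact absurd h (by simp [PySem.Set.empty])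
    · have hjlt : j < l.length := ((bOcc_mem l e j).1 hj).1
      have hje : e ∈ pvV l j := ((bOcc_mem l e j).1 hj).2
      refine ⟨hjlt, ?_⟩
      have hip : pvInterPos (pvV l i) (pvV l j) = true :=
        (pvInterPos_iff _ _).2 ⟨e, he, hje⟩
      have hne : pvSetEq (pvV l i) (pvV l j) = false := by
        rw [bCanon_getD l j hjlt, bCanon_getD l i hi] at hpred
        have h' : pvSetEq (pvV l j) (pvV l i) = false := by
          simpa [pvSetEq] using hpred
        rw [pvSetEq_symm] at h'
        exact h'
      simp [pvCb, hne, hip]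
  · rintro ⟨hjlt, hcb⟩
    rw [pvCb, Bool.and_eq_true, Bool.not_eq_eq_eq_not, Bool.not_true] at hcb
    obtain ⟨hne, hip⟩ := hcb
    obtain ⟨e, he1, he2⟩ := (pvInterPos_iff _ _).1 hip
    refine ⟨Or.inr ⟨e, he1, (bOcc_mem l e j).2 ⟨hjlt, he2⟩⟩, ?_⟩
    rw [bCanon_getD l j hjlt, bCanon_getD l i hi]
    have h' : pvSetEq (pvV l j) (pvV l i) = false := by rw [pvSetEq_symm]; exact hne
    simpa [pvSetEq] using h' 

lemma bAdj_nodup (l : List (List Int)) (i : Nat) :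
    ((bAdj l).getD i PySem.Set.empty).Nodup := by
  rw [bAdj_eq_map]
  by_cases hi : i < l.length
  · rw [PySem.List.getD_map_range _ _ _ _ hi]
    exact List.Nodup.filter _ (nb_nodup _ _ _ (by simp [PySem.Set.empty]))
  · rw [List.getD_eq_getElem?_getD, List.getElem?_eq_none (by simpa using hi)]
    simp [PySem.Set.empty]

-- the alive-array fold: a victim list sets exactly its members to false
lemma alive_fold_getD (vs : List Nat) :
    ∀ (a : List Bool) (j : Nat),
      (vs.foldl (fun a v => a.set v false) a).getD j false
        = (a.getD j false && !vs.contains j) := by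
  induction vs with
  | nil => intro a j; simp
  | cons v t ih =>
    intro a j
    rw [List.foldl_cons, ih]
    have hcont : (v :: t).contains j = ((j == v) || t.contains j) := List.contains_cons
    by_cases hvj : v = j
    · subst hvj
      have hL : (a.set v false).getD v false = false := by
        by_cases hv : v < a.length
        · rw [List.getD_eq_getElem?_getD, List.getElem?_set, if_pos rfl, if_pos hv]; rfl
        · rw [List.getD_eq_getElem?_getD, List.getElem?_set, if_pos rfl, if_neg hv]; rfl
      rw [hL, hcont]
      simp only [beq_self_eq_true, Bool.true_or, Bool.not_true, Bool.and_false,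
        Bool.false_and]
    · have hL : (a.set v false).getD j false = a.getD j false := by
        rw [List.getD_eq_getElem?_getD, List.getElem?_set, if_neg hvj,
          ← List.getD_eq_getElem?_getD]
      have hb : (j == v) = false := by simp [Ne.symm hvj]
      rw [hL, hcont, hb, Bool.false_or]

lemma alive_fold_length (vs : List Nat) (a : List Bool) :
    (vs.foldl (fun a v => a.set v false) a).length = a.length := by
  induction vs generalizing a with
  | nil => rfl
  | cons v t ih => rw [List.foldl_cons, ih, List.length_set]

-- the degree-array fold: each w in ws is decremented once per occurrence
lemma deg_fold_getD (ws : List Nat) :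
    ∀ (dg : List Int), (∀ w ∈ ws, w < dg.length) → ∀ i : Nat,
      (ws.foldl (fun dg w => dg.set w (dg.getD w 0 - 1)) dg).getD i 0
        = dg.getD i 0 - (ws.count i : Int) := by
  induction ws with
  | nil => intro dg _ i; simp
  | cons w t ih =>
    intro dg hw i
    have hwlen : w < dg.length := hw w (by simp)
    rw [List.foldl_cons, ih _ (fun w' hw' => by
      rw [List.length_set]; exact hw w' (by simp [hw']))]
    have hcnt : ((w :: t).count i : Int)
        = (t.count i : Int) + (if w = i then 1 else 0) := by
      rw [List.count_cons]
      split <;> simp_all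
    by_cases hwi : w = i
    · subst hwi
      have hL : (dg.set w (dg.getD w 0 - 1)).getD w 0 = dg.getD w 0 - 1 := by
        rw [List.getD_eq_getElem?_getD, List.getElem?_set, if_pos rfl, if_pos hwlen]
        simp
      rw [hL, hcnt]
      simp
      omega
    · have hL : (dg.set w (dg.getD w 0 - 1)).getD i 0 = dg.getD i 0 := by
        rw [List.getD_eq_getElem?_getD, List.getElem?_set, if_neg hwi,
          ← List.getD_eq_getElem?_getD]
      rw [hL, hcnt]
      simp [hwi]

lemma deg_fold_length (ws : List Nat) (dg : List Int) :
    (ws.foldl (fun dg w => dg.set w (dg.getD w 0 - 1)) dg).length = dg.length := by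
  induction ws generalizing dg with
  | nil => rfl
  | cons w t ih => rw [List.foldl_cons, ih, List.length_set]

-- the best-scan fold is min? over the live indices
lemma scan_fold_eq_min (deg : List Int) (key : Nat → Int) :
    ∀ (al : List Nat), (∀ j ∈ al, deg.getD j 0 = key j) →
    ∀ (b : Option Nat), (∀ m, b = some m → deg.getD m 0 = key m) →
      al.foldl
        (fun (b : Option Nat) i =>
          match b with
          | none => some i
          | some m => if deg.getD i 0 < deg.getD m 0 then some i else b) b
        = al.foldl (pvMinStep key) b := by
  intro al
  induction al with
  | nil => intro _ b _; rfl
  | cons i t ih =>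
    intro hal b hb
    have hi : deg.getD i 0 = key i := hal i (by simp)
    rw [List.foldl_cons, List.foldl_cons]
    cases b with
    | none =>
      exact ih (fun j hj => hal j (by simp [hj])) (some i)
        (fun m hm => by cases hm; exact hi)
    | some m =>
      have hm : deg.getD m 0 = key m := hb m rfl
      show t.foldl
          (fun (b : Option Nat) i =>
            match b with
            | none => some i
            | some m => if deg.getD i 0 < deg.getD m 0 then some i else b)
          (if deg.getD i 0 < deg.getD m 0 then some i else some m)
        = t.foldl (pvMinStep key) (if key i < key m then some i else some m)
      rw [hi, hm]
      by_cases hc : key i < key m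
      · rw [if_pos hc]
        exact ih (fun j hj => hal j (by simp [hj])) (some i)
          (fun m' hm' => by cases hm'; exact hi)
      · rw [if_neg hc]
        exact ih (fun j hj => hal j (by simp [hj])) (some m)
          (fun m' hm' => by cases hm'; exact hm)

-- the victim fold acts componentwise on its state triple
lemma foldl_prod3 {f1 : List Bool → Nat → List Bool} {f2 : List Int → Nat → List Int} :
    ∀ (V : List Nat) (a : List Bool) (d : List Int) (r : Int),
      V.foldl (fun (s : List Bool × List Int × Int) v => (f1 s.1 v, f2 s.2.1 v, s.2.2 - 1))
          (a, d, r)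
        = (V.foldl f1 a, V.foldl f2 d, r - (V.length : Int)) := by
  intro V
  induction V with
  | nil => intro a d r; simp
  | cons v t ih =>
    intro a d r
    rw [List.foldl_cons, ih, List.foldl_cons, List.foldl_cons]
    refine Prod.ext rfl (Prod.ext rfl ?_)
    simp only [List.length_cons]
    push_cast
    ring

-- the nested degree-decrement fold subtracts one per victim adjacent to i
lemma deg_fold_victims (adj : List (PySem.Set Nat)) :
    ∀ (V : List Nat) (dg : List Int),
      (∀ v ∈ V, ∀ w ∈ adj.getD v PySem.Set.empty, w < dg.length) →
      (∀ v ∈ V, (adj.getD v PySem.Set.empty).Nodup) →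
      ∀ i : Nat,
      (V.foldl (fun dg v => (adj.getD v PySem.Set.empty).foldl
          (fun dg w => dg.set w (dg.getD w 0 - 1)) dg) dg).getD i 0
        = dg.getD i 0 - ((V.countP (fun v => (adj.getD v PySem.Set.empty).contains i)) : Int) := by
  intro V
  induction V with
  | nil => intro dg _ _ i; simp
  | cons v t ih =>
    intro dg hw hnd i
    rw [List.foldl_cons]
    have hlen : ((adj.getD v PySem.Set.empty).foldl
        (fun dg w => dg.set w (dg.getD w 0 - 1)) dg).length = dg.length :=
      deg_fold_length _ _
    rw [ih _ (fun v' hv' w hw' => by rw [hlen]; exact hw v' (by simp [hv']) w hw')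
        (fun v' hv' => hnd v' (by simp [hv']))]
    rw [deg_fold_getD _ _ (fun w hw' => hw v (by simp) w hw')]
    have hcount : ((adj.getD v PySem.Set.empty).count i : Int)
        = if (adj.getD v PySem.Set.empty).contains i then 1 else 0 := by
      by_cases hmem : i ∈ adj.getD v PySem.Set.empty
      · have h1 := List.nodup_iff_count_le_one.1 (hnd v (by simp)) i
        have h2 := List.count_pos_iff.2 hmem
        have h3 : (adj.getD v PySem.Set.empty).count i = 1 := by omega
        have hc : (adj.getD v PySem.Set.empty).contains i = true := by
          simpa [List.contains_eq_mem] using hmem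
        rw [h3, hc]
        simp
      · have h3 : (adj.getD v PySem.Set.empty).count i = 0 := by
          rw [List.count_eq_zero]; exact hmem
        have hc : (adj.getD v PySem.Set.empty).contains i = false := by
          simpa [List.contains_eq_mem] using hmem
        rw [h3, hc]
        simp
    have hcp : ((v :: t).countP (fun v => (adj.getD v PySem.Set.empty).contains i) : Int)
        = (t.countP (fun v => (adj.getD v PySem.Set.empty).contains i) : Int)
          + (if (adj.getD v PySem.Set.empty).contains i then 1 else 0) := by
      rw [List.countP_cons]
      split <;> simp_all
    rw [hcount, hcp]
    ring

lemma deg_fold_victims_length (adj : List (PySem.Set Nat)) :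
    ∀ (V : List Nat) (dg : List Int),
      (V.foldl (fun dg v => (adj.getD v PySem.Set.empty).foldl
          (fun dg w => dg.set w (dg.getD w 0 - 1)) dg) dg).length = dg.length := by
  intro V
  induction V with
  | nil => intro dg; rfl
  | cons v t ih =>
    intro dg
    rw [List.foldl_cons, ih, deg_fold_length]

-- B's loop equals the reference loop
lemma bloop_eq (l : List (List Int)) (k : Int) (adj : List (PySem.Set Nat))
    (hadj : ∀ i, i < l.length → ∀ j : Nat,
      (j ∈ adj.getD i PySem.Set.empty ↔ j < l.length ∧ pvCb (pvV l i) (pvV l j)))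
    (hnd : ∀ i, (adj.getD i PySem.Set.empty).Nodup) :
    ∀ (fuel : Nat) (alive : List Bool) (deg : List Int) (remaining : Int)
      (r : List (List Int)),
      alive.length = l.length → deg.length = l.length →
      remaining = ((((List.range l.length).filter (fun i => alive.getD i false)).length : Nat) : Int) →
      (∀ i, i < l.length → deg.getD i 0
        = ((((List.range l.length).filter (fun i => alive.getD i false)).countP
              (fun j => pvCb (pvV l i) (pvV l j)) : Nat) : Int)) →
      ((List.range l.length).filter (fun i => alive.getD i false)).length < fuel →
      bLoop adj l k fuel alive deg remaining r
        = specLoop l k fuel ((List.range l.length).filter (fun i => alive.getD i false)) r := by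
  intro fuel
  induction fuel with
  | zero => intro alive deg remaining r _ _ _ _ hfuel; omega
  | succ f ih =>
    intro alive deg remaining r halen hdlen hrem hdeg hfuel
    set al := (List.range l.length).filter (fun i => alive.getD i false) with haldef
    by_cases hk : (r.length : Int) ≥ k
    · rw [bLoop, specLoop]
      rw [if_neg (by omega), if_neg (by rintro ⟨-, h⟩; omega)]
    · by_cases hal : al = []
      · have hrem0 : remaining = 0 := by rw [hrem, hal]; rfl
        rw [bLoop, specLoop]
        rw [if_neg (by omega), if_neg (by rintro ⟨h, -⟩; exact h hal)]
      · -- the round is taken on both sides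
        have al_sub : ∀ j ∈ al, j < l.length ∧ alive.getD j false = true := by
          intro j hj
          rw [haldef, List.mem_filter, List.mem_range] at hj
          exact hj
        have al_nodup : al.Nodup := List.Nodup.filter _ List.nodup_range
        have hrempos : remaining > 0 := by
          have h0 : 0 < al.length := List.length_pos_iff.2 hal
          rw [hrem]
          exact_mod_cast h0
        set key : Nat → Int :=
          fun i => ((al.countP (fun j => pvCb (pvV l i) (pvV l j)) : Nat) : Int) with hkeydef
        have hkeyal : ∀ j ∈ al, deg.getD j 0 = key j :=
          fun j hj => hdeg j (al_sub j hj).1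
        have hbestfold : (List.range l.length).foldl
            (fun (b : Option Nat) i =>
              if alive.getD i false then
                match b with
                | none => some i
                | some m => if deg.getD i 0 < deg.getD m 0 then some i else b
              else b) none
            = al.foldl
              (fun (b : Option Nat) i =>
                match b with
                | none => some i
                | some m => if deg.getD i 0 < deg.getD m 0 then some i else b) none := by
          rw [haldef]
          exact (List.foldl_filter).symm
        obtain ⟨a0, t0, hat⟩ := List.exists_cons_of_ne_nil hal
        obtain ⟨bi, ua, wa, hf, -, -, -⟩ := min_fold_split key t0 a0
        have hmin : PySem.List.min? al key = some bi := by
          rw [hat, min?_eq_fold, List.foldl_cons]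
          exact hf
        have hbest : (List.range l.length).foldl
            (fun (b : Option Nat) i =>
              if alive.getD i false then
                match b with
                | none => some i
                | some m => if deg.getD i 0 < deg.getD m 0 then some i else b
              else b) none = some bi := by
          rw [hbestfold, scan_fold_eq_min deg key al hkeyal none (by intro m h; cases h),
            ← min?_eq_fold, hmin]
        have hbimem : bi ∈ al := (min?_first_split al key bi hmin).1
        have hbin : bi < l.length := (al_sub bi hbimem).1
        have hbialive : alive.getD bi false = true := (al_sub bi hbimem).2
        set V : List Nat :=
          bi :: (adj.getD bi PySem.Set.empty).filter (fun j => alive.getD j false)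
          with hVdef
        have hVmem : ∀ j : Nat, j ∈ V ↔ j = bi ∨
            (j < l.length ∧ pvCb (pvV l bi) (pvV l j) = true ∧ alive.getD j false = true) := by
          intro j
          rw [hVdef]
          simp only [List.mem_cons, List.mem_filter]
          rw [hadj bi hbin j]
          tauto
        have hVnodup : V.Nodup := by
          rw [hVdef]
          refine List.nodup_cons.2 ⟨?_, List.Nodup.filter _ (hnd bi)⟩
          intro hmem
          have h1 := (hadj bi hbin bi).1 (List.mem_filter.1 hmem).1
          have := pvCb_self (pvV l bi)
          rw [h1.2] at this
          exact absurd this (by simp)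
        have hValive : ∀ v ∈ V, v < l.length := by
          intro v hv
          rcases (hVmem v).1 hv with rfl | h
          · exact hbin
          · exact h.1
        set q : Nat → Bool :=
          fun j => decide (j ≠ bi) && !pvCb (pvV l bi) (pvV l j) with hqdef
        have hnotq : ∀ j : Nat, (!q j) = (decide (j = bi) || pvCb (pvV l bi) (pvV l j)) := by
          intro j
          rw [hqdef]
          by_cases h : j = bi
          · subst h; simp
          · simp [h]
        have hVperm : V.Perm (al.filter (fun j => !q j)) := by
          refine (List.perm_ext_iff_of_nodup hVnodup (List.Nodup.filter _ al_nodup)).2 ?_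
          intro j
          rw [hVmem j, List.mem_filter, hnotq j]
          have hj_al : j ∈ al ↔ (j < l.length ∧ alive.getD j false = true) := by
            rw [haldef, List.mem_filter, List.mem_range]
          rw [hj_al]
          constructor
          · rintro (rfl | ⟨h1, h2, h3⟩)
            · exact ⟨⟨hbin, hbialive⟩, by simp⟩
            · exact ⟨⟨h1, h3⟩, by simp [h2]⟩
          · rintro ⟨⟨h1, h2⟩, h3⟩
            have h3' : decide (j = bi) = true ∨ pvCb (pvV l bi) (pvV l j) = true := by
              simpa using h3
            rcases h3' with h4 | h4
            · exact Or.inl (by simpa using h4)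
            · exact Or.inr ⟨h1, h4, h2⟩
        have hqbi : q bi = false := by rw [hqdef]; simp
        have hallt : (al.filter q).length < al.length := by
          have h1 := countP_lt_of_mem_false al q bi hbimem hqbi
          rw [List.countP_eq_length_filter] at h1
          exact h1
        -- the state after the victim fold, componentwise
        have hst := foldl_prod3 (f1 := fun a v => a.set v false)
          (f2 := fun dg v => (adj.getD v PySem.Set.empty).foldl
            (fun dg w => dg.set w (dg.getD w 0 - 1)) dg) V alive deg remaining
        set A' : List Bool := V.foldl (fun a v => a.set v false) alive with hA'def
        set D' : List Int := V.foldl (fun dg v => (adj.getD v PySem.Set.empty).foldl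
            (fun dg w => dg.set w (dg.getD w 0 - 1)) dg) deg with hD'def
        have hal' : (List.range l.length).filter (fun i => A'.getD i false) = al.filter q := by
          have hr : al.filter q
              = (List.range l.length).filter (fun j => q j && alive.getD j false) := by
            rw [haldef, List.filter_filter]
          rw [hr]
          apply List.filter_congr
          intro j hjr
          show A'.getD j false = (q j && alive.getD j false)
          rw [hA'def, alive_fold_getD]
          by_cases haj : alive.getD j false = true
          · rw [haj]
            simp only [Bool.true_and, Bool.and_true]
            rw [Bool.eq_iff_iff]
            simp only [Bool.not_eq_eq_eq_not, Bool.not_true, List.contains_eq_mem,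
              decide_eq_false_iff_not]
            rw [hVmem j]
            constructor
            · intro hnot
              have hne : j ≠ bi := fun h => hnot (Or.inl h)
              have hcb : pvCb (pvV l bi) (pvV l j) = false := by
                cases hcb : pvCb (pvV l bi) (pvV l j)
                · rfl
                · exact absurd (Or.inr ⟨List.mem_range.1 hjr, hcb, haj⟩) hnot
              rw [hqdef]
              simp [hne, hcb]
            · intro hq hmem
              rcases hmem with rfl | ⟨-, hcb, -⟩
              · rw [hqbi] at hq; exact absurd hq (by simp)
              · rw [hqdef] at hq
                simp [hcb] at hq
          · have haj' : alive.getD j false = false := by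
              cases h : alive.getD j false
              · rfl
              · exact absurd h haj
            rw [haj']
            simp only [Bool.false_and, Bool.and_false]
        have hlen' : A'.length = l.length := by rw [hA'def, alive_fold_length, halen]
        have hdlen' : D'.length = l.length := by
          rw [hD'def, deg_fold_victims_length, hdlen]
        have hlsplit : al.length
            = (al.filter q).length + (al.filter (fun j => !q j)).length :=
          List.length_eq_length_filter_add q
        have hVlen : V.length = (al.filter (fun j => !q j)).length := hVperm.length_eq
        have hrem' : remaining - (V.length : Int) = (((al.filter q).length : Nat) : Int) := by
          rw [hrem, hVlen]
          omega
        have hdeg' : ∀ i, i < l.length → D'.getD i 0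
            = (((al.filter q).countP (fun j => pvCb (pvV l i) (pvV l j)) : Nat) : Int) := by
          intro i hin
          rw [hD'def, deg_fold_victims adj V deg
            (fun v hv w hw => by
              rw [hdlen]
              exact ((hadj v (hValive v hv) w).1 hw).1)
            (fun v _ => hnd v), hdeg i hin]
          have hVc : V.countP (fun v => (adj.getD v PySem.Set.empty).contains i)
              = V.countP (fun v => pvCb (pvV l i) (pvV l v)) := by
            refine countP_congr_mem V _ _ (fun v hv => ?_)
            have hvn := hValive v hv
            have h1 := hadj v hvn i
            rw [Bool.eq_iff_iff]
            constructor
            · intro hc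
              have hm : i ∈ adj.getD v PySem.Set.empty := by simpa using hc
              rw [pvCb_symm]
              exact (h1.1 hm).2
            · intro hc
              have hm : i ∈ adj.getD v PySem.Set.empty :=
                h1.2 ⟨hin, by rw [pvCb_symm (pvV l v) (pvV l i)]; exact hc⟩
              simpa using hm
          have hsplit2 : al.countP (fun j => pvCb (pvV l i) (pvV l j))
              = (al.filter q).countP (fun j => pvCb (pvV l i) (pvV l j))
                + (al.filter (fun j => !q j)).countP (fun j => pvCb (pvV l i) (pvV l j)) :=
            List.countP_eq_countP_filter_add al _ q
          have hVcount : V.countP (fun v => pvCb (pvV l i) (pvV l v))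
              = (al.filter (fun j => !q j)).countP (fun v => pvCb (pvV l i) (pvV l v)) :=
            hVperm.countP_eq _
          rw [hVc, hVcount]
          omega
        have hrec := ih A' D' (remaining - (V.length : Int)) (r ++ [l.getD bi []])
          hlen' hdlen'
          (by rw [hal']; exact hrem')
          (by intro i hi; rw [hal']; exact hdeg' i hi)
          (by rw [hal']; omega)
        rw [bLoop, specLoop]
        rw [if_pos ⟨hrempos, by omega⟩, if_pos ⟨hal, by omega⟩]
        rw [hkeydef] at hmin
        simp only [hbest, hmin]
        rw [← hVdef]
        simp only [hst]
        rw [hrec, hal', hqdef]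
        rfl

-- ===== VERDICT (by name: the statement is the Claim_ definition above) =====
theorem first_min_intersection_spec : Claim_equal_first_min_intersection := by
  intro k l _ hpre
  have hA : fmiLoop k (l.length + 1) l []
      = specLoop l k (l.length + 1) (List.range l.length) [] := by
    have h := loop_eq l k hpre (l.length + 1) (List.range l.length) []
      List.pairwise_lt_range (by simp) (by simp)
    rw [map_range_self] at h
    exact h
  have hal0 : (List.range l.length).filter
      (fun i => (List.replicate l.length true).getD i false) = List.range l.length := by
    apply List.filter_eq_self.2
    intro i hi
    rw [List.getD_eq_getElem?_getD, List.getElem?_replicate, if_pos (List.mem_range.1 hi)]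
    rfl
  have hadjlen : ∀ i, i < l.length → ((bAdj l).getD i PySem.Set.empty).length
      = (List.range l.length).countP (fun j => pvCb (pvV l i) (pvV l j)) := by
    intro i hi
    have hperm : ((bAdj l).getD i PySem.Set.empty).Perm
        ((List.range l.length).filter (fun j => pvCb (pvV l i) (pvV l j))) := by
      refine (List.perm_ext_iff_of_nodup (bAdj_nodup l i)
        (List.Nodup.filter _ List.nodup_range)).2 ?_
      intro j
      rw [bAdj_mem l i hi j, List.mem_filter, List.mem_range]
    rw [hperm.length_eq, ← List.countP_eq_length_filter]
  have hB := bloop_eq l k (bAdj l) (fun i hi j => bAdj_mem l i hi j) (bAdj_nodup l)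
    (l.length + 1) (List.replicate l.length true)
    ((List.range l.length).map (fun i => (((bAdj l).getD i PySem.Set.empty).length : Int)))
    (l.length : Int) []
    (by simp)
    (by simp)
    (by rw [hal0]; simp)
    (by
      intro i hi
      rw [hal0, PySem.List.getD_map_range _ _ _ _ hi, hadjlen i hi])
    (by rw [hal0, List.length_range]; omega)
  rw [hal0] at hB
  unfold Spec_first_min_intersection first_min_intersection first_min_intersection_alt
  dsimp only
  rw [hA, hB]
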